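-- pv_equiv track=rewrite | github.com/ctmht/AdvancedML | src/vae_example.py | swap_nested_dict_axes
-- ===== SOURCE A (Python) =====
-- def swap_nested_dict_axes(dictionary: dict) -> dict:
--     keys = []
--     for nested_dicts in dictionary.values():
--         keys += list(nested_dicts.keys())
--
--     keys = set(keys)
--     output = {}
--     for key in keys:
--         output[key] = {
--             outer_key: nested_dict[key]
--             for outer_key, nested_dict in dictionary.items()
--             if key in nested_dict
--         }
--
--     return output
-- ===== SOURCE B (Python) =====
-- def swap_nested_dict_axes(dictionary: dict) -> dict:
--     output = {}
--     for outer_key, nested_dict in dictionary.items():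
--         for key, value in nested_dict.items():
--             output.setdefault(key, {})[outer_key] = value
--     return output
-- ===== Notes on version B (the rewrite author's own statement) =====
-- stated objective: faster
-- what changed: Instead of collecting all inner keys, deduplicating them into a set and then rescanning the whole dictionary once per distinct inner key, B makes a single pass over all entries and drops each value into a bucket obtained by setdefault; Pre_ only excludes Lean-side association lists whose inner lists carry duplicate keys, which no Python dict can produce.
import Mathlib
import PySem

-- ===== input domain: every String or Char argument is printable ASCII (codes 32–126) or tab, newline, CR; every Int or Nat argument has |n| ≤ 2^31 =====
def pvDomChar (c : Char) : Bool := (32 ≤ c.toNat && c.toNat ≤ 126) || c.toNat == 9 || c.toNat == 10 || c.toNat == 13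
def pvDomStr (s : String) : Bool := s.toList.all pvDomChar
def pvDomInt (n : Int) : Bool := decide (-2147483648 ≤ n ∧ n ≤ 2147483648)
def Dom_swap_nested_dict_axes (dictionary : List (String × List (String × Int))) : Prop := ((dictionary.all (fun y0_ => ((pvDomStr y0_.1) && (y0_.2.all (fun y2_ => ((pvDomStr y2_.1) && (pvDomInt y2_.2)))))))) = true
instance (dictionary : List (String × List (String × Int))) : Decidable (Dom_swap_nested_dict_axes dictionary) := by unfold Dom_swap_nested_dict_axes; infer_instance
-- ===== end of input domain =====

-- B replaces A's "collect all inner keys, dedupe into a set, then rescan the whole dictionary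
-- once per distinct inner key" with a single pass over all entries, dropping each value into a
-- setdefault bucket (objective: faster). Both ports use first-occurrence key order for the
-- output (Python A's top-level key order is CPython's set iteration order; dict outputs are
-- compared ignoring order).

-- ===== PORT A =====
def swap_nested_dict_axes (dictionary : List (String × List (String × Int))) : List (String × List (String × Int)) :=
  -- keys = []; for nested_dicts in dictionary.values(): keys += list(nested_dicts.keys())
  let keys : List String := dictionary.foldl (fun acc p => acc ++ p.2.map (·.1)) []
  -- keys = set(keys)
  let ks : PySem.Set String := PySem.Set.ofList keys
  -- output = {}; for key in keys: output[key] = {outer: nested[key] for outer, nested in dictionary.items() if key in nested}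
  let output : PySem.Dict String (List (String × Int)) :=
    ks.foldl (fun out key =>
      out.insert key
        (dictionary.foldl (fun inner p =>
          match (PySem.Dict.mk p.2).get? key with
          | some v => inner ++ [(p.1, v)]
          | none => inner) [])) PySem.Dict.empty
  output.items

-- ===== PORT B =====
def swap_nested_dict_axes_alt (dictionary : List (String × List (String × Int))) : List (String × List (String × Int)) :=
  -- output = {}; for outer_key, nested in dictionary.items(): for key, value in nested.items(): output.setdefault(key, {})[outer_key] = value
  (dictionary.foldl (fun out p =>
      p.2.foldl (fun out q => out.modify q.1 [] (fun bucket => bucket ++ [(p.1, q.2)])) out)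
    PySem.Dict.empty).items

-- ===== PRECONDITION & SPEC =====
-- Pre_ excludes only Lean-side association lists whose INNER lists carry duplicate keys: such a
-- value represents no Python dict (a dict's keys are unique), so Python A never receives it; on
-- it A's port keeps the first match per outer entry while B's port keeps every entry.
def Pre_swap_nested_dict_axes (dictionary : List (String × List (String × Int))) : Prop :=
  ∀ p ∈ dictionary, (p.2.map Prod.fst).Nodup
instance (dictionary : List (String × List (String × Int))) : Decidable (Pre_swap_nested_dict_axes dictionary) := by unfold Pre_swap_nested_dict_axes; infer_instance

def pvWitness_swap_nested_dict_axes : (List (String × List (String × Int))) :=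
  [("a", [("x", 1), ("y", 2)]), ("b", [("x", 3)])]

def Spec_swap_nested_dict_axes (dictionary : List (String × List (String × Int))) (out : List (String × List (String × Int))) : Prop := out = swap_nested_dict_axes_alt dictionary
instance (dictionary : List (String × List (String × Int))) (out : List (String × List (String × Int))) : Decidable (Spec_swap_nested_dict_axes dictionary out) := by unfold Spec_swap_nested_dict_axes; infer_instance

-- ===== CLAIM (what is proved, stated in full; the proofs are below) =====
def Claim_equal_swap_nested_dict_axes : Prop := ∀ (dictionary : List (String × List (String × Int))), Dom_swap_nested_dict_axes dictionary → Pre_swap_nested_dict_axes dictionary → Spec_swap_nested_dict_axes dictionary (swap_nested_dict_axes dictionary)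

-- ===== LEMMAS AND PROOFS =====

-- the flattened entry stream B walks: (inner_key, (outer_key, value)) per entry
def pvEntries (dictionary : List (String × List (String × Int))) : List (String × (String × Int)) :=
  dictionary.flatMap (fun p => p.2.map (fun q => (q.1, (p.1, q.2))))

-- B's nested loop is the modify-loop over the flattened entry stream
theorem pvB_eq_entries_foldl (dictionary : List (String × List (String × Int))) :
    (dictionary.foldl (fun out p =>
        p.2.foldl (fun out q => out.modify q.1 [] (fun bucket => bucket ++ [(p.1, q.2)])) out)
      PySem.Dict.empty)
    = (pvEntries dictionary).foldl (fun out x => out.modify x.1 [] (fun bucket => bucket ++ [x.2])) PySem.Dict.empty := by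
  unfold pvEntries
  rw [List.foldl_flatMap]
  simp only [List.foldl_map]

-- A's guarded lookup on a duplicate-free inner list yields that list's entries with key k
theorem pvMatch_eq_filter (o : String) (k : String) (xs : List (String × Int))
    (h : (xs.map Prod.fst).Nodup) :
    (match (PySem.Dict.mk xs).get? k with
     | some v => [(o, v)]
     | none => ([] : List (String × Int)))
    = (xs.filter (fun q => q.1 == k)).map (fun q => (o, q.2)) := by
  induction xs with
  | nil => rfl
  | cons a t ih =>
    simp only [List.map_cons, List.nodup_cons] at h
    rw [show (PySem.Dict.mk (a :: t)).get? k
        = if (a.1 == k) = true then some a.2 else (PySem.Dict.mk t).get? k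
      from PySem.Dict.get?_mk_cons a.1 a.2 t k]
    by_cases hk : (a.1 == k) = true
    · have hak : a.1 = k := by simpa using hk
      have hnil : t.filter (fun q => q.1 == k) = [] := by
        rw [List.filter_eq_nil_iff]
        intro q hq
        have hmem : q.1 ∈ t.map Prod.fst := List.mem_map_of_mem hq
        simp only [beq_iff_eq]
        intro hqk
        exact h.1 (by rw [hak, ← hqk]; exact hmem)
      simp [hk, hnil]
    · rw [if_neg hk]
      simp only [List.filter_cons, hk, if_false, Bool.false_eq_true]
      exact ih h.2

-- A's per-key rescan of the dictionary equals the filtered flattened stream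
theorem pvBucket_eq (k : String) :
    ∀ (dictionary : List (String × List (String × Int))),
    Pre_swap_nested_dict_axes dictionary →
    ∀ acc : List (String × Int),
    dictionary.foldl (fun inner p =>
        match (PySem.Dict.mk p.2).get? k with
        | some v => inner ++ [(p.1, v)]
        | none => inner) acc
    = acc ++ ((pvEntries dictionary).filter (fun x => x.1 == k)).map (fun x => x.2) := by
  intro dictionary
  induction dictionary with
  | nil => intro _ acc; simp [pvEntries]
  | cons p t ih =>
    intro hpre acc
    have hp : (p.2.map Prod.fst).Nodup := hpre p List.mem_cons_self
    have ht : Pre_swap_nested_dict_axes t := fun q hq => hpre q (List.mem_cons_of_mem _ hq)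
    simp only [List.foldl_cons]
    rw [ih ht]
    have hstep : (match (PySem.Dict.mk p.2).get? k with
        | some v => acc ++ [(p.1, v)]
        | none => acc)
        = acc ++ (match (PySem.Dict.mk p.2).get? k with
                  | some v => [(p.1, v)]
                  | none => ([] : List (String × Int))) := by
      cases (PySem.Dict.mk p.2).get? k <;> simp
    rw [hstep, pvMatch_eq_filter p.1 k p.2 hp]
    simp [pvEntries, List.filter_append, List.map_append, List.filter_map,
      List.map_map, Function.comp_def, List.append_assoc]

-- A's concatenated inner-key list is the entry stream's first components
theorem pvKeys_eq (dictionary : List (String × List (String × Int))) :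
    dictionary.foldl (fun acc p => acc ++ p.2.map (·.1)) []
    = (pvEntries dictionary).map (·.1) := by
  rw [PySem.List.foldl_append_eq_flatMap]
  simp [pvEntries, List.map_flatMap, List.map_map, Function.comp_def]

-- ===== VERDICT (by name: the statement is the Claim_ definition above) =====
theorem swap_nested_dict_axes_spec : Claim_equal_swap_nested_dict_axes := by
  intro dictionary _hdom hpre
  unfold Spec_swap_nested_dict_axes
  simp only [swap_nested_dict_axes, swap_nested_dict_axes_alt]
  rw [pvB_eq_entries_foldl]
  -- B's items: its keys are the deduped entry keys, its buckets the filtered entry stream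
  have hBnodup : ((pvEntries dictionary).foldl
      (fun out x => out.modify x.1 [] (fun bucket => bucket ++ [x.2])) PySem.Dict.empty).keys.Nodup := by
    rw [PySem.Dict.keys_foldl_modify_key (pvEntries dictionary) (fun x => x.1) []
      (fun _ x => fun bucket => bucket ++ [x.2]) PySem.Dict.empty]
    simp only [PySem.Dict.keys_empty, PySem.Set.update_nil_left]
    exact PySem.Set.nodup_ofList _
  rw [PySem.Dict.items_eq_map_keys _ hBnodup []]
  rw [PySem.Dict.keys_foldl_modify_key (pvEntries dictionary) (fun x => x.1) []
    (fun _ x => fun bucket => bucket ++ [x.2]) PySem.Dict.empty]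
  simp only [PySem.Dict.keys_empty, PySem.Set.update_nil_left]
  -- A's items: inserts over distinct fresh keys from the empty dict append in order
  rw [pvKeys_eq]
  rw [PySem.Dict.items_foldl_insert_fresh (PySem.Set.ofList ((pvEntries dictionary).map (·.1)))
    (fun a => a)
    (fun key => dictionary.foldl (fun inner p =>
      match (PySem.Dict.mk p.2).get? key with
      | some v => inner ++ [(p.1, v)]
      | none => inner) [])
    PySem.Dict.empty
    (fun a _ => PySem.Dict.contains_empty a)
    (by simp only [List.map_id_fun']; exact PySem.Set.nodup_ofList ((pvEntries dictionary).map (·.1)))]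
  rw [show (PySem.Dict.empty : PySem.Dict String (List (String × Int))).items = [] from rfl,
    List.nil_append]
  -- pointwise: for every key, A's bucket is B's bucket
  apply List.map_congr_left
  intro k _
  rw [pvBucket_eq k dictionary hpre []]
  rw [PySem.Dict.getD_foldl_modify_append (pvEntries dictionary) PySem.Dict.empty k]
  simp
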